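-- pv_equiv track=rewrite | github.com/frboc/adventofcode | 2021/13/1.py | transform
-- ===== SOURCE A (Python) =====
-- def transform(a):
-- 	dim = max(len(a), len(a[0]))
-- 	new = [[0] * dim for i in range(dim)]
--
-- 	for x in range(dim):
-- 		for y in range(dim):
-- 			try:
-- 				new[y][x] = a[x][y]
-- 			except IndexError:
-- 				pass
-- 	return new
-- ===== SOURCE B (Python) =====
-- def transform(a):
--     dim = max(len(a), len(a[0]))
--     tails = list(a)
--     out = []
--     for _ in range(dim):
--         out.append([t[0] if t else 0 for t in tails] + [0] * (dim - len(tails)))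
--         tails = [t[1:] for t in tails]
--     return out
-- ===== Notes on version B (the rewrite author's own statement) =====
-- stated objective: alternative
-- what changed: Replaces the indexed dim x dim fill with try/except by the functional heads-and-tails peeling transpose: each output row is the list of current row heads (0 for exhausted rows), then every row is replaced by its tail; no element indexing at all.
import Mathlib
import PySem

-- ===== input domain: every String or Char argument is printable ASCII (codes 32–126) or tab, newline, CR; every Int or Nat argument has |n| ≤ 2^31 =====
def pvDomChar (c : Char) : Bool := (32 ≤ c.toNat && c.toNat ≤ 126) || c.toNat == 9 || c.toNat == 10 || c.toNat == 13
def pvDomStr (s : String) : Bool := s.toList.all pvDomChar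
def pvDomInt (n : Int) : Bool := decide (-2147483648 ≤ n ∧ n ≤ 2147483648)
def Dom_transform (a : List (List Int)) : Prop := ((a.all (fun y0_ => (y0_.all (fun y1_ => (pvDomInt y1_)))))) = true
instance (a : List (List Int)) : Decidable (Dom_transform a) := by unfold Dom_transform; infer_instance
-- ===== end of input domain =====

-- B replaces A's indexed element-wise fill with try/except by the functional
-- heads-and-tails peeling transpose (no element indexing): an alternative decomposition.

-- ===== PORT A =====
-- a[0] is ported as headD []: exact on the nonempty lists Pre_transform admits.
-- indices x, y are the nonnegative values of range(dim), so List.range / getElem? are exact;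
-- a[x][y] with try/except IndexError becomes the Option match (none = IndexError = pass).
def transform (a : List (List Int)) : List (List Int) :=
  let dim := max a.length (a.headD []).length
  let new := List.replicate dim (List.replicate dim (0 : Int))
  (List.range dim).foldl (fun new x =>
    (List.range dim).foldl (fun new y =>
      match a[x]? >>= fun row => row[y]? with
      | some v => new.modify y (fun r => r.set x v)
      | none => new) new) new

-- ===== PORT B =====
-- loop state is the pair (out, tails); 't[0] if t else 0' is headD 0, 't[1:]' is tail.
def transform_alt (a : List (List Int)) : List (List Int) :=
  let dim := max a.length (a.headD []).length
  ((List.range dim).foldl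
    (fun (st : List (List Int) × List (List Int)) _ =>
      (st.1 ++ [(st.2.map fun t => t.headD 0) ++ List.replicate (dim - st.2.length) (0 : Int)],
       st.2.map fun t => t.tail))
    ([], a)).1

-- ===== PRECONDITION & SPEC =====
-- Pre_ excludes only the empty list, on which A's a[0] raises IndexError.
def Pre_transform (a : List (List Int)) : Prop := a ≠ []
instance (a : List (List Int)) : Decidable (Pre_transform a) := by unfold Pre_transform; infer_instance
def pvWitness_transform : List (List Int) := [[1, 2, 3], [4]]

def Spec_transform (a : List (List Int)) (out : List (List Int)) : Prop := out = transform_alt a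
instance (a : List (List Int)) (out : List (List Int)) : Decidable (Spec_transform a out) := by unfold Spec_transform; infer_instance

-- ===== CLAIM (what is proved, stated in full; the proofs are below) =====
def Claim_equal_transform : Prop := ∀ (a : List (List Int)), Dom_transform a → Pre_transform a → Spec_transform a (transform a)

-- ===== LEMMAS AND PROOFS =====

-- the value A tries to write at column x, row y (none = IndexError, skipped)
def pvCell (a : List (List Int)) (x y : Nat) : Option Int := a[x]? >>= fun row => row[y]?

-- A's inner loop, row-wise: it patches column x of every row y ∈ ys
theorem pv_inner (a : List (List Int)) (x : Nat) :
    ∀ (ys : List Nat), ys.Nodup → ∀ (new : List (List Int)) (j : Nat),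
    (ys.foldl (fun new y =>
      match a[x]? >>= fun row => row[y]? with
      | some v => new.modify y (fun r => r.set x v)
      | none => new) new)[j]? =
    new[j]?.map (fun row => if j ∈ ys then
      (match pvCell a x j with | some v => row.set x v | none => row) else row) := by
  intro ys
  induction ys with
  | nil => intro _ new j; simp
  | cons y ys ih =>
    intro hnd new j
    rcases List.nodup_cons.mp hnd with ⟨hy, hnd'⟩
    rw [List.foldl_cons, ih hnd' _ j]
    by_cases hjy : j = y
    · subst hjy
      cases hc : a[x]? >>= fun row => row[j]? with
      | none => simp [hc, hy, pvCell]
      | some v =>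
        simp [hc, hy, pvCell]
        cases new[j]? <;> simp
    · have hstep : (match a[x]? >>= fun row => row[y]? with
        | some v => new.modify y (fun r => r.set x v)
        | none => new)[j]? = new[j]? := by
        cases hc : a[x]? >>= fun row => row[y]? with
        | none => rfl
        | some v =>
          have hyj : ¬ y = j := fun h => hjy h.symm
          simp [List.getElem?_modify, hyj]
      rw [hstep]
      simp [List.mem_cons, hjy]

-- A's outer loop, row-wise
theorem pv_outer (a : List (List Int)) (dim : Nat) (xs : List Nat)
    (new : List (List Int)) (j : Nat) :
    (xs.foldl (fun new x =>
      (List.range dim).foldl (fun new y =>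
        match a[x]? >>= fun row => row[y]? with
        | some v => new.modify y (fun r => r.set x v)
        | none => new) new) new)[j]? =
    new[j]?.map (fun row => xs.foldl (fun row x => if j ∈ List.range dim then
      (match pvCell a x j with | some v => row.set x v | none => row) else row) row) := by
  induction xs generalizing new with
  | nil => simp
  | cons x xs ih =>
    rw [List.foldl_cons, ih]
    rw [pv_inner a x (List.range dim) List.nodup_range _ j]
    cases new[j]? <;> simp

-- the row-level fold writes cell (i, j) at each position i ∈ xs where it exists
theorem pv_rowfold (a : List (List Int)) (j : Nat) :
    ∀ (xs : List Nat), xs.Nodup → ∀ (row : List Int), (∀ x ∈ xs, x < row.length) →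
    ∀ (i : Nat),
    (xs.foldl (fun row x =>
      (match pvCell a x j with | some v => row.set x v | none => row)) row)[i]? =
    if i ∈ xs ∧ (pvCell a i j).isSome then pvCell a i j else row[i]? := by
  intro xs
  induction xs with
  | nil => intro _ row _ i; simp
  | cons x xs ih =>
    intro hnd row hlen i
    rcases List.nodup_cons.mp hnd with ⟨hx, hnd'⟩
    rw [List.foldl_cons]
    have hlen' : ∀ y ∈ xs, y < ((match pvCell a x j with
        | some v => row.set x v | none => row) : List Int).length := by
      intro y hy
      cases pvCell a x j <;> simpa using hlen y (List.mem_cons_of_mem _ hy)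
    rw [ih hnd' _ hlen' i]
    have hset : ((match pvCell a x j with
        | some v => row.set x v | none => row) : List Int)[i]? =
        if i = x ∧ (pvCell a x j).isSome then pvCell a x j else row[i]? := by
      cases hc : pvCell a x j with
      | none => simp
      | some v =>
        rw [List.getElem?_set]
        by_cases hix : i = x
        · subst hix; simp [hlen i List.mem_cons_self]
        · simp [hix, Ne.symm hix]
    by_cases hi : i ∈ xs
    · have hix : i ≠ x := fun h => hx (h ▸ hi)
      by_cases hs : (pvCell a i j).isSome
      · simp [hi, hs, List.mem_cons]
      · simp only [hi, hs, and_false, true_and]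
        rw [hset]
        simp [hix, List.mem_cons, hi]
    · by_cases hix : i = x
      · subst hix
        simp [hi, hset, List.mem_cons]
      · simp [hi, hix, hset, List.mem_cons]

-- unconditional form of List.getElem?_range
theorem pv_range_getElem? (n i : Nat) : (List.range n)[i]? = if i < n then some i else none := by
  by_cases h : i < n
  · rw [List.getElem?_range h, if_pos h]
  · rw [if_neg h]
    exact List.getElem?_eq_none (by simpa using le_of_not_gt h)

-- A, entry-wise, with dim abstracted: for j < dim the result row j holds (pvCell i j).getD 0 at column i
theorem pv_transform_aux (a : List (List Int)) (dim : Nat) (hla : a.length ≤ dim) (j : Nat) :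
    ((List.range dim).foldl (fun new x =>
      (List.range dim).foldl (fun new y =>
        match a[x]? >>= fun row => row[y]? with
        | some v => new.modify y (fun r => r.set x v)
        | none => new) new)
      (List.replicate dim (List.replicate dim (0 : Int))))[j]? =
    (if j < dim then
      some ((List.range dim).map (fun i => (pvCell a i j).getD 0)) else none) := by
  rw [pv_outer a dim (List.range dim) _ j, List.getElem?_replicate]
  by_cases hj : j < dim
  · rw [if_pos hj, if_pos hj]
    simp only [Option.map_some]
    refine congrArg some ?_
    have hguard : (fun (row : List Int) (x : Nat) => if j ∈ List.range dim then
        (match pvCell a x j with | some v => row.set x v | none => row) else row) =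
        (fun (row : List Int) (x : Nat) =>
        (match pvCell a x j with | some v => row.set x v | none => row)) := by
      funext row x; simp [List.mem_range, hj]
    rw [hguard]
    apply List.ext_getElem?
    intro i
    rw [pv_rowfold a j (List.range dim) List.nodup_range _ (by simp) i]
    rw [List.getElem?_map, pv_range_getElem? _ _]
    by_cases hi : i < dim
    · simp only [List.mem_range, hi, true_and, Option.map_some]
      cases hc : pvCell a i j with
      | none => simp [hc, List.getElem?_replicate, hi]
      | some v => simp [hc]
    · have hc : pvCell a i j = none := by
        have hai : a.length ≤ i := le_trans hla (le_of_not_gt hi)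
        simp [pvCell, List.getElem?_eq_none hai]
      simp [hc, List.mem_range, hi]
  · rw [if_neg hj, if_neg hj]; rfl

theorem pv_transform_getElem? (a : List (List Int)) (j : Nat) :
    (transform a)[j]? =
    (if j < max a.length (a.headD []).length then
      some ((List.range (max a.length (a.headD []).length)).map
        (fun i => (pvCell a i j).getD 0)) else none) :=
  pv_transform_aux a _ (le_max_left _ _) j

-- B's fold, unrolled: the out-accumulator collects one peeled row per iteration
theorem pv_alt_fold (dim : Nat) :
    ∀ (l : List Nat) (out ts : List (List Int)),
    ((l.foldl
      (fun (st : List (List Int) × List (List Int)) _ =>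
        (st.1 ++ [(st.2.map fun t => t.headD 0) ++ List.replicate (dim - st.2.length) (0 : Int)],
         st.2.map fun t => t.tail))
      (out, ts)).1) =
    out ++ (List.range l.length).map
      (fun j => (ts.map fun t => (t.drop j).headD 0) ++ List.replicate (dim - ts.length) (0 : Int)) := by
  intro l
  induction l with
  | nil => intro out ts; simp
  | cons n l ih =>
    intro out ts
    rw [List.foldl_cons, ih]
    rw [List.length_cons, List.range_succ_eq_map]
    simp only [List.map_cons, List.map_map, List.append_assoc, List.singleton_append,
      List.length_map, List.drop_zero]
    congr 2
    apply List.map_congr_left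
    intro j _
    simp [Function.comp, List.tail_drop]

-- B, entry-wise: the peeled rows are A's transposed rows
theorem pv_alt_getElem? (a : List (List Int)) (j : Nat) :
    (transform_alt a)[j]? =
    (if j < max a.length (a.headD []).length then
      some ((List.range (max a.length (a.headD []).length)).map
        (fun i => (pvCell a i j).getD 0)) else none) := by
  have hla : a.length ≤ max a.length (a.headD []).length := le_max_left _ _
  unfold transform_alt
  rw [pv_alt_fold _ (List.range _) [] a]
  rw [List.nil_append, List.length_range, List.getElem?_map, pv_range_getElem? _ _]
  by_cases hj : j < max a.length (a.headD []).length
  · rw [if_pos hj, if_pos hj]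
    simp only [Option.map_some]
    refine congrArg some ?_
    apply List.ext_getElem?
    intro i
    rw [List.getElem?_append, List.getElem?_map, List.getElem?_map, pv_range_getElem? _ _]
    by_cases hia : i < a.length
    · have hi : i < max a.length (a.headD []).length := lt_of_lt_of_le hia hla
      rw [if_pos (by simpa using hia), if_pos hi, List.getElem?_eq_getElem hia]
      simp only [Option.map_some]
      refine congrArg some ?_
      rw [List.headD_eq_head?_getD, List.head?_drop]
      simp [pvCell, List.getElem?_eq_getElem hia]
    · rw [if_neg (by simpa using hia), List.getElem?_replicate]
      have hc : pvCell a i j = none := by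
        simp [pvCell, List.getElem?_eq_none (le_of_not_gt hia)]
      by_cases hi : i < max a.length (a.headD []).length
      · have hsub : i - a.length < max a.length (a.headD []).length - a.length := by omega
        rw [List.length_map, if_pos hsub, if_pos hi]
        simp only [Option.map_some, hc, Option.getD_none]
      · have hsub : ¬ i - a.length < max a.length (a.headD []).length - a.length := by omega
        rw [List.length_map, if_neg hsub, if_neg hi]
        rfl
  · rw [if_neg hj, if_neg hj]
    rfl

-- ===== VERDICT (by name: the statement is the Claim_ definition above) =====
theorem transform_spec : Claim_equal_transform := by
  intro a _ _
  unfold Spec_transform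
  apply List.ext_getElem?
  intro j
  rw [pv_transform_getElem?, pv_alt_getElem?]
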